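-- pv_equiv track=rewrite | github.com/Cheenya/resources-audit | zabbix-inventory/zabbix_inventory_ssh_scan.py | extract_exec_binary
-- ===== SOURCE A (Python) =====
-- from typing import Any, Dict, Iterable, List, Optional
--
-- def extract_exec_binary(exec_start: str) -> Optional[str]:
--     # ExecStart may look like: /usr/bin/python3 -m module
--     if not exec_start:
--         return None
--     # systemd show: ExecStart={ path=..., argv[]=...; } can be messy
--     # but often the first word is the binary
--     parts = exec_start.split()
--     for w in parts:
--         if w.startswith("/"):
--             return w
--     return None
-- ===== SOURCE B (Python) =====
-- def extract_exec_binary(exec_start):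
--     i, n = 0, len(exec_start)
--     while i < n:
--         c = exec_start[i]
--         if c.isspace():
--             i += 1
--         elif c == '/':
--             j = i + 1
--             while j < n and not exec_start[j].isspace():
--                 j += 1
--             return exec_start[i:j]
--         else:
--             while i < n and not exec_start[i].isspace():
--                 i += 1
--     return None
-- ===== Notes on version B (the rewrite author's own statement) =====
-- stated objective: simpler
-- what changed: Replaces split()-into-a-token-list-plus-scan with a single index-based pass over the characters that skips whitespace and non-'/' tokens and slices out the first token starting with '/', never materialising a token list.
import Mathlib
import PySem

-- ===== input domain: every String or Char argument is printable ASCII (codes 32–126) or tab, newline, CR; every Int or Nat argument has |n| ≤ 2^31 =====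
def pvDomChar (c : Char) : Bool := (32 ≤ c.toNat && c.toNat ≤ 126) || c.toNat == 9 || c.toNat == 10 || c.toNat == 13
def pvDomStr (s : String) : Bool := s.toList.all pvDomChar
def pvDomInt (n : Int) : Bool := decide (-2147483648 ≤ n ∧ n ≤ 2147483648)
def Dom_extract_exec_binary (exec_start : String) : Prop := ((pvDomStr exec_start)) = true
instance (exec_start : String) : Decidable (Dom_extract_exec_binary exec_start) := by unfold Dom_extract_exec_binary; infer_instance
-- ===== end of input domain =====

-- B replaces A's split()-into-a-token-list-then-scan with a single index-free pass over the
-- characters that never materialises the token list (objective: simpler/alternative, same O(n) cost).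

-- ===== PORT A =====
-- 'for w in parts: if w.startswith("/"): return w' / 'return None'
def extractLoopA : List String → Option String
  | [] => none
  | w :: ws => if PySem.Str.startswith w "/" then some w else extractLoopA ws

def extract_exec_binary (exec_start : String) : Option String :=
  if exec_start = "" then none
  else extractLoopA (PySem.Str.split₀ exec_start)

-- ===== PORT B =====
-- inner while of B's '/'-branch: take the token's characters up to the next whitespace
def altTakeTok : List Char → List Char
  | [] => []
  | c :: rest => if PySem.Chars.isspace c then [] else c :: altTakeTok rest

-- inner while of B's else-branch: skip the rest of the current (non-'/') token
def altSkipTok : List Char → List Char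
  | [] => []
  | c :: rest => if PySem.Chars.isspace c then c :: rest else altSkipTok rest

theorem altSkipTok_length_le (l : List Char) : (altSkipTok l).length ≤ l.length := by
  induction l with
  | nil => simp [altSkipTok]
  | cons c rest ih =>
    simp only [altSkipTok]
    split
    · exact Nat.le_refl _
    · exact Nat.le_succ_of_le ih

-- B's outer while loop over the characters
def altGo : List Char → Option (List Char)
  | [] => none
  | c :: rest =>
    if PySem.Chars.isspace c then altGo rest
    else if c = '/' then some (c :: altTakeTok rest)
    else altGo (altSkipTok rest)
termination_by l => l.length
decreasing_by
  · simp
  · simpa using Nat.lt_succ_of_le (altSkipTok_length_le rest)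

def extract_exec_binary_alt (exec_start : String) : Option String :=
  (altGo exec_start.toList).map String.ofList

-- ===== PRECONDITION & SPEC =====
def Spec_extract_exec_binary (exec_start : String) (out : Option String) : Prop := out = extract_exec_binary_alt exec_start
instance (exec_start : String) (out : Option String) : Decidable (Spec_extract_exec_binary exec_start out) := by unfold Spec_extract_exec_binary; infer_instance

-- ===== CLAIM (what is proved, stated in full; the proofs are below) =====
def Claim_equal_extract_exec_binary : Prop := ∀ (exec_start : String), Dom_extract_exec_binary exec_start → Spec_extract_exec_binary exec_start (extract_exec_binary exec_start)

-- ===== LEMMAS AND PROOFS =====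

-- the char-level version of A's scan over the split tokens
def findFirstC : List (List Char) → Option (List Char)
  | [] => none
  | w :: ws => if PySem.Chars.startswith w ['/'] then some w else findFirstC ws

theorem extractLoopA_eq_findFirstC (parts : List (List Char)) :
    extractLoopA (parts.map String.ofList) = (findFirstC parts).map String.ofList := by
  induction parts with
  | nil => rfl
  | cons w ws ih =>
    simp only [List.map, extractLoopA, findFirstC, PySem.Str.startswith,
      show (String.ofList w).toList = w from by simp,
      show ("/" : String).toList = ['/'] from rfl]
    split <;> simp [ih]

-- split₀.go with any accumulator is the accumulator (reversed) followed by go with accumulator []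
theorem split₀_go_acc (s cur : List Char) (acc : List (List Char)) :
    PySem.Chars.split₀.go s cur acc = acc.reverse ++ PySem.Chars.split₀.go s cur [] := by
  induction s generalizing cur acc with
  | nil =>
    simp only [PySem.Chars.split₀.go]
    split <;> simp
  | cons c rest ih =>
    simp only [PySem.Chars.split₀.go]
    split
    · split
      · exact ih _ _
      · rw [ih [] (cur.reverse :: acc), ih [] [cur.reverse]]
        simp
    · exact ih _ _

-- mid-token invariant: with a nonempty current token, go finishes that token then restarts
theorem split₀_go_mid (s : List Char) (cur : List Char) (h : cur ≠ []) :
    PySem.Chars.split₀.go s cur [] =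
      (cur.reverse ++ altTakeTok s) :: PySem.Chars.split₀.go (altSkipTok s) [] [] := by
  induction s generalizing cur with
  | nil =>
    simp only [PySem.Chars.split₀.go, altTakeTok, altSkipTok]
    simp [List.isEmpty_iff, h]
  | cons c rest ih =>
    simp only [PySem.Chars.split₀.go, altTakeTok, altSkipTok]
    by_cases hs : PySem.Chars.isspace c = true
    · simp only [hs, if_true, List.isEmpty_iff, h, if_false]
      rw [split₀_go_acc rest [] [cur.reverse]]
      simp [PySem.Chars.split₀.go, hs]
    · simp only [hs, Bool.false_eq_true, if_false]
      rw [ih (c :: cur) (by simp)]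
      simp

-- split₀ on a word head produces the head token then splits the remainder
theorem split₀_cons_word (c : Char) (rest : List Char) (h : ¬ PySem.Chars.isspace c = true) :
    PySem.Chars.split₀ (c :: rest) =
      (c :: altTakeTok rest) :: PySem.Chars.split₀ (altSkipTok rest) := by
  simp only [PySem.Chars.split₀, PySem.Chars.split₀.go, h, Bool.false_eq_true, if_false]
  rw [split₀_go_mid rest [c] (by simp)]
  rfl

theorem split₀_cons_space (c : Char) (rest : List Char) (h : PySem.Chars.isspace c = true) :
    PySem.Chars.split₀ (c :: rest) = PySem.Chars.split₀ rest := by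
  simp [PySem.Chars.split₀, PySem.Chars.split₀.go, h]

-- main bridge: A's scan over the split tokens equals B's single pass
theorem findFirstC_split₀_eq_altGo (cs : List Char) :
    findFirstC (PySem.Chars.split₀ cs) = altGo cs := by
  induction cs using altGo.induct with
  | case1 => simp [PySem.Chars.split₀, PySem.Chars.split₀.go, findFirstC, altGo]
  | case2 c rest hs ih =>
    rw [split₀_cons_space c rest hs, altGo]
    simp [hs, ih]
  | case3 rest hs =>
    rw [split₀_cons_word '/' rest (by simpa using hs), altGo]
    simp [hs, findFirstC, PySem.Chars.startswith]
  | case4 c rest hs hc ih =>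
    rw [split₀_cons_word c rest (by simp [hs]), altGo]
    simp only [hs, Bool.false_eq_true, if_false, hc, findFirstC]
    have hpref : PySem.Chars.startswith (c :: altTakeTok rest) ['/'] = false := by
      simp [PySem.Chars.startswith, List.isPrefixOf]
      intro h; exact absurd h.symm hc
    simp [hpref, ih]

-- ===== VERDICT (by name: the statement is the Claim_ definition above) =====
theorem extract_exec_binary_spec : Claim_equal_extract_exec_binary := by
  intro s _
  unfold Spec_extract_exec_binary extract_exec_binary extract_exec_binary_alt
  by_cases he : s = ""
  · subst he; simp [altGo]
  · simp only [he, if_false]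
    rw [show PySem.Str.split₀ s = (PySem.Chars.split₀ s.toList).map String.ofList from rfl,
        extractLoopA_eq_findFirstC, findFirstC_split₀_eq_altGo]
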